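-- pv_equiv track=rewrite | github.com/ed18s007/MiRL | MIRL/ISBI/ODIR/reduce.py | my_indx
-- ===== SOURCE A (Python) =====
-- def my_indx(arr, width):
-- 	first = 0
-- 	for i in range(width):
-- 		if(arr[i] == 0):
-- 			first = i
-- 		elif(arr[i]>0):
-- 			break
-- 	return first
-- ===== SOURCE B (Python) =====
-- def my_indx(arr, width):
--     p = next((i for i in range(width) if arr[i] > 0), width)
--     zeros = [i for i in range(p) if arr[i] == 0]
--     return zeros[-1] if zeros else 0
-- ===== Notes on version B (the rewrite author's own statement) =====
-- stated objective: alternative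
-- what changed: Replaces A's single scan that tracks the last zero and breaks at the first positive by a two-step decomposition: first find the boundary p (index of the first positive, or width), then take the last zero index in range(p) via a comprehension.
import Mathlib
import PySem

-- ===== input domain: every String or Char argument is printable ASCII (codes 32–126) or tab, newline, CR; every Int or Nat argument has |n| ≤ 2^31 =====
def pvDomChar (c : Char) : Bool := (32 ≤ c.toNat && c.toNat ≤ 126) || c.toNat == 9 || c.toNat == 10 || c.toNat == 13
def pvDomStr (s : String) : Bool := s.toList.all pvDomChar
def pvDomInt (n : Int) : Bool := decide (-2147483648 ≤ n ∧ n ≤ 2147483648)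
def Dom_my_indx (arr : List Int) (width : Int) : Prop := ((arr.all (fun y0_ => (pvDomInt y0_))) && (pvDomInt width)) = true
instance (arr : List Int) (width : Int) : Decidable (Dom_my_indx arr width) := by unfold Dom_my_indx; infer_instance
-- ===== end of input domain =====

-- B replaces A's single scan-with-break by a find-boundary-then-scan-prefix decomposition (alternative, same cost).


-- ===== PORT A =====
-- 'for i in range(width): …' with break, carrying 'first'; iterated lazily on the index exactly
-- like Python's for/break; arr[i] is in range on every admitted input (Pre_ below), so pyGetD's
-- default is never reached there
def my_indx_go (arr : List Int) (width : Int) (i : Int) (first : Int) : Int :=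
  if _h : i < width then
    let v := PySem.List.pyGetD arr i 0
    if v = 0 then my_indx_go arr width (i + 1) i
    else if 0 < v then first
    else my_indx_go arr width (i + 1) first
  else first
termination_by (width - i).toNat
decreasing_by all_goals omega

def my_indx (arr : List Int) (width : Int) : Int :=
  my_indx_go arr width 0 0

-- ===== PORT B =====
-- p = next((i for i in range(width) if arr[i] > 0), width) — the generator is consumed lazily
def my_indx_findp (arr : List Int) (width : Int) (i : Int) : Int :=
  if _h : i < width then
    if 0 < PySem.List.pyGetD arr i 0 then i else my_indx_findp arr width (i + 1)
  else width
termination_by (width - i).toNat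
decreasing_by omega

-- zeros = [i for i in range(p) if arr[i] == 0]; return zeros[-1] if zeros else 0
def my_indx_alt (arr : List Int) (width : Int) : Int :=
  let p := my_indx_findp arr width 0
  let zeros := (PySem.List.pyRange 0 p 1).filter (fun i => PySem.List.pyGetD arr i 0 = 0)
  zeros.getLast?.getD 0

-- ===== PRECONDITION & SPEC =====
-- exactly the inputs on which Python A returns: either every scanned index is in range
-- (width ≤ len(arr)), or the scan breaks at a positive element before running off the end
def Pre_my_indx (arr : List Int) (width : Int) : Prop :=
  width ≤ (arr.length : Int) ∨ arr.any (fun x => 0 < x) = true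
instance (arr : List Int) (width : Int) : Decidable (Pre_my_indx arr width) := by unfold Pre_my_indx; infer_instance
def pvWitness_my_indx : List Int × Int := ([0, -1, 0, 2, 0], 5)
def Spec_my_indx (arr : List Int) (width : Int) (out : Int) : Prop := out = my_indx_alt arr width
instance (arr : List Int) (width : Int) (out : Int) : Decidable (Spec_my_indx arr width out) := by unfold Spec_my_indx; infer_instance

-- ===== CLAIM (what is proved, stated in full; the proofs are below) =====
def Claim_equal_my_indx : Prop := ∀ (arr : List Int) (width : Int), Dom_my_indx arr width → Pre_my_indx arr width → Spec_my_indx arr width (my_indx arr width)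

-- ===== LEMMAS AND PROOFS =====

-- list-of-indices reformulation of A's loop, used only in the proofs
def loopA (arr : List Int) : List Int → Int → Int
  | [], first => first
  | i :: rest, first =>
    let v := PySem.List.pyGetD arr i 0
    if v = 0 then loopA arr rest i
    else if 0 < v then first
    else loopA arr rest first


theorem my_indx_go_eq (arr : List Int) (width : Int) :
    ∀ (n : Nat) (i first : Int), (width - i).toNat = n →
      my_indx_go arr width i first = loopA arr (PySem.List.pyRange i width 1) first := by
  intro n
  induction n with
  | zero =>
    intro i first h
    rw [my_indx_go, PySem.List.pyRange_one_eq_nil (by omega),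
      dif_neg (by omega : ¬ i < width)]
    rfl
  | succ n ih =>
    intro i first h
    rw [my_indx_go, PySem.List.pyRange_one_cons (by omega)]
    simp only [(by omega : i < width), dif_pos, loopA]
    by_cases h0 : PySem.List.pyGetD arr i 0 = 0
    · simp [h0, ih (i + 1) i (by omega)]
    · by_cases hp : 0 < PySem.List.pyGetD arr i 0
      · simp [h0, hp]
      · simp [h0, hp, ih (i + 1) first (by omega)]

theorem my_indx_findp_eq (arr : List Int) (width : Int) :
    ∀ (n : Nat) (i : Int), (width - i).toNat = n →
      my_indx_findp arr width i =
        ((PySem.List.pyRange i width 1).find?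
          (fun j => decide (0 < PySem.List.pyGetD arr j 0))).getD width := by
  intro n
  induction n with
  | zero =>
    intro i h
    rw [my_indx_findp, PySem.List.pyRange_one_eq_nil (by omega),
      dif_neg (by omega : ¬ i < width)]
    rfl
  | succ n ih =>
    intro i h
    rw [my_indx_findp, PySem.List.pyRange_one_cons (by omega)]
    simp only [(by omega : i < width), dif_pos, List.find?_cons]
    by_cases hp : 0 < PySem.List.pyGetD arr i 0
    · simp [hp]
    · simp [hp, ih (i + 1) (by omega)]

theorem getLast?_cons_getD (i first : Int) (zs : List Int) :
    (i :: zs).getLast?.getD first = zs.getLast?.getD i := by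
  cases zs with
  | nil => rfl
  | cons z zs =>
    cases h : (z :: zs).getLast? with
    | none => simp at h
    | some x => simp [List.getLast?_cons_cons, h]

-- A's loop computes: last zero index among indices before the first positive, default 'first'
theorem loopA_char (arr : List Int) (l : List Int) (first : Int) :
    loopA arr l first =
      ((l.takeWhile (fun i => !decide (0 < PySem.List.pyGetD arr i 0))).filter
        (fun i => PySem.List.pyGetD arr i 0 = 0)).getLast?.getD first := by
  induction l generalizing first with
  | nil => rfl
  | cons i rest ih =>
    by_cases h0 : PySem.List.pyGetD arr i 0 = 0
    · have hnp : ¬ (0 < PySem.List.pyGetD arr i 0) := by omega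
      simp [loopA, h0, hnp, List.filter_cons, ih, getLast?_cons_getD]
    · by_cases hp : 0 < PySem.List.pyGetD arr i 0
      · simp [loopA, h0, hp]
      · simp [loopA, h0, hp, List.filter_cons, ih]

-- range(0, p) with p the first positive index (or width) IS the takeWhile prefix of range(0, width)
theorem range_takeWhile (arr : List Int) (n : Nat) : ∀ (a b : Int), (b - a).toNat = n →
    PySem.List.pyRange a
        (((PySem.List.pyRange a b 1).find? (fun i => decide (0 < PySem.List.pyGetD arr i 0))).getD b) 1
      = (PySem.List.pyRange a b 1).takeWhile (fun i => !decide (0 < PySem.List.pyGetD arr i 0)) := by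
  induction n with
  | zero =>
    intro a b h
    have hba : b ≤ a := by omega
    rw [PySem.List.pyRange_one_eq_nil hba]
    simp [PySem.List.pyRange_one_eq_nil hba]
  | succ n ih =>
    intro a b h
    have hab : a < b := by omega
    rw [PySem.List.pyRange_one_cons hab]
    by_cases hp : 0 < PySem.List.pyGetD arr a 0
    · simp [hp, PySem.List.pyRange_one_eq_nil (le_refl a)]
    · have hrec := ih (a + 1) b (by omega)
      simp only [List.find?_cons, hp, decide_false, List.takeWhile_cons, Bool.not_false,
        if_true]
      rw [← hrec]
      set p := ((PySem.List.pyRange (a+1) b 1).find?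
        (fun i => decide (0 < PySem.List.pyGetD arr i 0))).getD b with hpdef
      have hap : a < p := by
        rcases hfind : (PySem.List.pyRange (a+1) b 1).find?
            (fun i => decide (0 < PySem.List.pyGetD arr i 0)) with _ | q
        · simp [hpdef, hfind]; omega
        · have hmem := List.mem_of_find?_eq_some hfind
          rw [PySem.List.mem_pyRange_one] at hmem
          simp [hpdef, hfind]; omega
      rw [PySem.List.pyRange_one_cons hap]

-- ===== VERDICT (by name: the statement is the Claim_ definition above) =====
theorem my_indx_spec : Claim_equal_my_indx := by
  intro arr width _ _
  show my_indx arr width = my_indx_alt arr width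
  rw [my_indx, my_indx_alt, my_indx_go_eq arr width (width - 0).toNat 0 0 rfl,
    my_indx_findp_eq arr width (width - 0).toNat 0 rfl, loopA_char,
    range_takeWhile arr (width - 0).toNat 0 width rfl]
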